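-- pv_equiv track=rewrite | github.com/Gabriel-EspinozaDiaz/Phylogeny | Outdated/Phy_methods.py | checkSequences
-- ===== SOURCE A (Python) =====
-- def checkSequences(sequences): #Ensures that all AA sequences are valid
--     allowed_AAs = ['A','R','N','D','C','Q','E','G','H',
--     'I','L','K','M','F','P','O','S','U','T','W','Y','V',]
--
--     for n in range(len(sequences)): #Ensures that all AA sequences are the same length
--         if len(sequences[n]) != len(sequences[0]):
--             return 'ERROR: ALL STRINGS MUST BE SAME LENGTH'
--
--     for n in range(len(sequences)): #Ensures that AA sequences don't contain any incorrect AA 1-letter codes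
--         for letter in range(len(sequences[0])):
--             if sequences[n][letter] not in allowed_AAs:
--                 return 'ERROR: SEQUENCES(S) CONTAIN INVALID AMINO ACID CODES'
--
--     return "Yep, you're all good :)"
-- ===== SOURCE B (Python) =====
-- _MSGS = ["Yep, you're all good :)",
--          'ERROR: SEQUENCES(S) CONTAIN INVALID AMINO ACID CODES',
--          'ERROR: ALL STRINGS MUST BE SAME LENGTH']
-- _ALLOWED = 'ARNDCQEGHILKMFPOSUTWYV'
--
-- def checkSequences(sequences):
--     # single pass: maintain a severity accumulator (0 ok, 1 bad code, 2 bad length),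
--     # length mismatch dominates so it short-circuits; map the final status to its message
--     status = 0
--     L = len(sequences[0]) if sequences else 0
--     for s in sequences:
--         if len(s) != L:
--             status = 2
--             break
--         if status == 0 and not all(c in _ALLOWED for c in s):
--             status = 1
--     return _MSGS[status]
-- ===== Notes on version B (the rewrite author's own statement) =====
-- stated objective: alternative
-- what changed: Replaces A's two staged passes with early returns by a single pass over the sequences maintaining a severity accumulator (0 ok < 1 invalid code < 2 length mismatch, length dominating), then a table lookup mapping the final status to its message.
import Mathlib
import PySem

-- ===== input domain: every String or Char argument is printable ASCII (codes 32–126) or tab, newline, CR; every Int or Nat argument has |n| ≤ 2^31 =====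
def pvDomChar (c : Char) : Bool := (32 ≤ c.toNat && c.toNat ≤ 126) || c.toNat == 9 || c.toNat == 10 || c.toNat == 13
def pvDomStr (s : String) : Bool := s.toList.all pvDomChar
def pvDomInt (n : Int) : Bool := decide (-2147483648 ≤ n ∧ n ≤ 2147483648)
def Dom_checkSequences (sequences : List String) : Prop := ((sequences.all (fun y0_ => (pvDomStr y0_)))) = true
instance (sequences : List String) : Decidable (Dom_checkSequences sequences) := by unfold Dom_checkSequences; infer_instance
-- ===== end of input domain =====

-- B replaces A's two staged passes with early returns by a single pass keeping a severity
-- accumulator (0 ok < 1 invalid code < 2 length mismatch) and a final message-table lookup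
-- (objective: alternative).

-- ===== PORT A =====
def pvAllowedAAs : List Char :=
  ['A','R','N','D','C','Q','E','G','H','I','L','K','M','F','P','O','S','U','T','W','Y','V']

-- first loop: early return on the first length mismatch
def pvALenBad : List String → Nat → Bool
  | [], _ => false
  | s :: rest, L => if s.toList.length ≠ L then true else pvALenBad rest L

-- inner loop: early return on the first character not in allowed_AAs
def pvACharBad : List Char → Bool
  | [] => false
  | c :: rest => if ¬ (c ∈ pvAllowedAAs) then true else pvACharBad rest

-- second loop over the sequences
def pvASeqBad : List String → Bool
  | [] => false
  | s :: rest => if pvACharBad s.toList then true else pvASeqBad rest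

def checkSequences (sequences : List String) : String :=
  match sequences with
  | [] => "Yep, you're all good :)"
  | s0 :: _ =>
    if pvALenBad sequences s0.toList.length then "ERROR: ALL STRINGS MUST BE SAME LENGTH"
    else if pvASeqBad sequences then "ERROR: SEQUENCES(S) CONTAIN INVALID AMINO ACID CODES"
    else "Yep, you're all good :)"

-- ===== PORT B =====
def pvMsgs : List String :=
  ["Yep, you're all good :)",
   "ERROR: SEQUENCES(S) CONTAIN INVALID AMINO ACID CODES",
   "ERROR: ALL STRINGS MUST BE SAME LENGTH"]

def pvAllowedStr : List Char := "ARNDCQEGHILKMFPOSUTWYV".toList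

-- the single-pass loop over sequences carrying the severity accumulator
def pvBLoop (L : Nat) : List String → Nat → Nat
  | [], st => st
  | s :: rest, st =>
    if s.toList.length ≠ L then 2
    else pvBLoop L rest
      (if st = 0 ∧ ¬ (s.toList.all (fun c => c ∈ pvAllowedStr)) then 1 else st)

def checkSequences_alt (sequences : List String) : String :=
  let L := match sequences with
    | [] => 0
    | s0 :: _ => s0.toList.length
  let status := pvBLoop L sequences 0
  pvMsgs.getD status ""

-- ===== PRECONDITION & SPEC =====
def Spec_checkSequences (sequences : List String) (out : String) : Prop := out = checkSequences_alt sequences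
instance (sequences : List String) (out : String) : Decidable (Spec_checkSequences sequences out) := by unfold Spec_checkSequences; infer_instance

-- ===== CLAIM =====
def Claim_equal_checkSequences : Prop := ∀ (sequences : List String), Dom_checkSequences sequences → Spec_checkSequences sequences (checkSequences sequences)

-- ===== LEMMAS AND PROOFS =====

theorem pvAllowed_eq : pvAllowedStr = pvAllowedAAs := by decide

-- A's early-return char scan equals "some char of the string is disallowed"
theorem pvACharBad_eq (cs : List Char) :
    pvACharBad cs = !(cs.all (fun c => decide (c ∈ pvAllowedStr))) := by
  rw [pvAllowed_eq]
  induction cs with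
  | nil => rfl
  | cons c rest ih =>
    simp only [pvACharBad, List.all_cons]
    by_cases h : c ∈ pvAllowedAAs
    · rw [if_neg (not_not_intro h), ih, decide_eq_true h, Bool.true_and]
    · rw [if_pos h, decide_eq_false h, Bool.false_and, Bool.not_false]

-- B's loop characterised: 2 iff some length mismatches; else 1 iff st = 1 or some bad char
theorem pvBLoop_eq (L : Nat) (seqs : List String) (st : Nat) (hst : st = 0 ∨ st = 1) :
    pvBLoop L seqs st =
      if seqs.any (fun s => decide (s.toList.length ≠ L)) then 2
      else if st = 1 ∨ seqs.any (fun s => !(s.toList.all (fun c => decide (c ∈ pvAllowedStr)))) then 1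
      else st := by
  induction seqs generalizing st with
  | nil =>
    rcases hst with h | h <;> simp [pvBLoop, h]
  | cons s rest ih =>
    simp only [pvBLoop, List.any_cons]
    by_cases hl : s.toList.length = L
    · rw [if_neg (not_not_intro hl), decide_eq_false (not_not_intro hl), Bool.false_or]
      by_cases hc : (s.toList.all (fun c => decide (c ∈ pvAllowedStr))) = true
      · rw [if_neg (by simp [hc]), ih st hst]
        simp only [hc, Bool.not_true, Bool.false_or]
      · have hc' : (s.toList.all (fun c => decide (c ∈ pvAllowedStr))) = false :=
          Bool.eq_false_iff.mpr hc
        simp only [hc', Bool.not_false, Bool.true_or]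
        rcases hst with h0 | h1
        · rw [if_pos (by exact ⟨h0, by simp⟩), ih 1 (Or.inr rfl)]
          by_cases hr : (rest.any (fun s => decide (s.toList.length ≠ L))) = true
          · rw [if_pos hr, if_pos hr]
          · rw [if_neg hr, if_neg hr, if_pos (Or.inl rfl), if_pos (by simp)]
        · subst h1
          have e1 : (if (1:Nat) = 0 ∧ ¬false = true then 1 else 1) = 1 := by split <;> rfl
          rw [e1, ih 1 (Or.inr rfl)]
          by_cases hr : (rest.any (fun s => decide (s.toList.length ≠ L))) = true
          · rw [if_pos hr, if_pos hr]
          · rw [if_neg hr, if_neg hr, if_pos (Or.inl rfl), if_pos (Or.inl rfl)]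
    · rw [if_pos hl, decide_eq_true hl, Bool.true_or, if_pos rfl]

theorem pvALenBad_eq_any (seqs : List String) (L : Nat) :
    pvALenBad seqs L = seqs.any (fun s => decide (s.toList.length ≠ L)) := by
  induction seqs with
  | nil => rfl
  | cons s rest ih =>
    simp only [pvALenBad, List.any_cons]
    by_cases h : s.toList.length = L
    · rw [if_neg (not_not_intro h), decide_eq_false (not_not_intro h), Bool.false_or, ih]
    · rw [if_pos h, decide_eq_true h, Bool.true_or]

theorem pvASeqBad_eq_any (seqs : List String) :
    pvASeqBad seqs = seqs.any (fun s => !(s.toList.all (fun c => decide (c ∈ pvAllowedStr)))) := by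
  induction seqs with
  | nil => rfl
  | cons s rest ih =>
    have e : pvASeqBad (s :: rest) = if pvACharBad s.toList then true else pvASeqBad rest := rfl
    rw [e, pvACharBad_eq, List.any_cons, ih]
    cases h : (s.toList.all (fun c => decide (c ∈ pvAllowedStr)) : Bool) <;> simp

-- ===== VERDICT =====
theorem checkSequences_spec : Claim_equal_checkSequences := by
  intro sequences _
  unfold Spec_checkSequences checkSequences checkSequences_alt
  cases sequences with
  | nil => rfl
  | cons s0 rest =>
    show (if pvALenBad (s0 :: rest) s0.toList.length = true then
            "ERROR: ALL STRINGS MUST BE SAME LENGTH"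
          else if pvASeqBad (s0 :: rest) = true then
            "ERROR: SEQUENCES(S) CONTAIN INVALID AMINO ACID CODES"
          else "Yep, you're all good :)")
        = pvMsgs.getD (pvBLoop s0.toList.length (s0 :: rest) 0) ""
    rw [pvALenBad_eq_any, pvASeqBad_eq_any]
    rw [pvBLoop_eq s0.toList.length (s0 :: rest) 0 (Or.inl rfl)]
    by_cases h1 : ((s0 :: rest).any (fun s => decide (s.toList.length ≠ s0.toList.length))) = true
    · rw [if_pos h1, if_pos h1]; rfl
    · rw [if_neg h1, if_neg h1]
      by_cases h2 : ((s0 :: rest).any (fun s => !(s.toList.all (fun c => decide (c ∈ pvAllowedStr))))) = true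
      · rw [if_pos h2, if_pos (Or.inr h2)]; rfl
      · rw [if_neg h2, if_neg (fun h => h.elim (by omega) h2)]; rfl
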